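-- pv_equiv track=rewrite | github.com/sergey-frd/cds_rus_py | de_ekran_02.py | to_digit
-- ===== SOURCE A (Python) =====
-- def to_digit(input_str):
--
--     if input_str == '':
--         return '0','0'
--
--     result_1 = ''
--     result_2 = ''
--     flag = 0
--
--     for p in input_str:
--
--         if p.isdigit() or p == '.':
--             if flag == 0:
--                 result_1 += p
--             else:
--                 result_2 += p
--         else:
--             if flag == 0:
--                 flag = 1
--             else:
--                 break
--
--     return result_1,result_2
-- ===== SOURCE B (Python) =====
-- def to_digit(input_str):
--     if input_str == '':
--         return '0', '0'
--
--     def run(s):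
--         i = 0
--         while i < len(s) and (s[i].isdigit() or s[i] == '.'):
--             i += 1
--         return s[:i]
--
--     r1 = run(input_str)
--     rest = input_str[len(r1) + 1:]
--     r2 = run(rest)
--     return r1, r2
-- ===== Notes on version B (the rewrite author's own statement) =====
-- stated objective: simpler
-- what changed: Replaces the single-pass flag state machine with two independent leading-run extractions: take the maximal digit/dot prefix, skip one delimiter character by slicing, take the next digit/dot run.
import Mathlib
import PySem

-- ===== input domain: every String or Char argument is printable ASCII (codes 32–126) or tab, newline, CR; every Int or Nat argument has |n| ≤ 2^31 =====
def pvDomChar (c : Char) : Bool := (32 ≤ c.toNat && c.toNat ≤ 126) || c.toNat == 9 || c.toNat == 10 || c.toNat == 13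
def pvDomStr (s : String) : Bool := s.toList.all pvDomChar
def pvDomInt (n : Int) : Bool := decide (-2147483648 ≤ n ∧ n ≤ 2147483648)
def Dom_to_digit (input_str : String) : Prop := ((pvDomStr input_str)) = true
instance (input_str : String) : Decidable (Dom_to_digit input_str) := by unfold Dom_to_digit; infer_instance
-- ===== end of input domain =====

-- B replaces A's one-pass flag state machine by two independent leading-run
-- extractions separated by a one-character skip (objective: simpler).

-- ===== PORT A =====
-- the per-character test 'p.isdigit() or p == "."'
def pvPred (p : Char) : Bool := PySem.Chars.isdigit p || p == '.'

-- A's loop: state (result_1, result_2, flag); returning = the 'break'/loop end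
def pvLoopA : List Char → List Char → List Char → Nat → List Char × List Char
  | [], r1, r2, _ => (r1, r2)
  | p :: rest, r1, r2, flag =>
    if pvPred p then
      if flag = 0 then pvLoopA rest (r1 ++ [p]) r2 flag
      else pvLoopA rest r1 (r2 ++ [p]) flag
    else
      if flag = 0 then pvLoopA rest r1 r2 1
      else (r1, r2)

def to_digit (input_str : String) : String × String :=
  if input_str = "" then ("0", "0")
  else
    let r := pvLoopA input_str.toList [] [] 0
    (String.mk r.1, String.mk r.2)

-- ===== PORT B =====
-- B's 'run': advance while digit/dot, return the prefix passed over
def pvRun : List Char → List Char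
  | [] => []
  | c :: cs => if pvPred c then c :: pvRun cs else []

def to_digit_alt (input_str : String) : String × String :=
  if input_str = "" then ("0", "0")
  else
    let r1 := pvRun input_str.toList
    let rest := input_str.toList.drop (r1.length + 1)
    (String.mk r1, String.mk (pvRun rest))

-- ===== PRECONDITION & SPEC =====
def Spec_to_digit (input_str : String) (out : String × String) : Prop := out = to_digit_alt input_str
instance (input_str : String) (out : String × String) : Decidable (Spec_to_digit input_str out) := by unfold Spec_to_digit; infer_instance

-- ===== CLAIM (what is proved, stated in full; the proofs are below) =====
def Claim_equal_to_digit : Prop := ∀ (input_str : String), Dom_to_digit input_str → Spec_to_digit input_str (to_digit input_str)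

-- ===== LEMMAS AND PROOFS =====

-- with flag = 1 the loop only appends the next run to result_2
theorem pvLoopA_flag1 (l r1 r2 : List Char) :
    pvLoopA l r1 r2 1 = (r1, r2 ++ pvRun l) := by
  induction l generalizing r2 with
  | nil => simp [pvLoopA, pvRun]
  | cons c cs ih =>
    by_cases h : pvPred c = true <;> simp [pvLoopA, pvRun, h, ih]

-- with flag = 0 the loop computes B's decomposition
theorem pvLoopA_flag0 (l r1 : List Char) :
    pvLoopA l r1 [] 0 = (r1 ++ pvRun l, pvRun (l.drop ((pvRun l).length + 1))) := by
  induction l generalizing r1 with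
  | nil => simp [pvLoopA, pvRun]
  | cons c cs ih =>
    by_cases h : pvPred c = true
    · simpa [pvLoopA, pvRun, h] using ih (r1 ++ [c])
    · simp [pvLoopA, pvRun, h, pvLoopA_flag1]

-- ===== VERDICT (by name: the statement is the Claim_ definition above) =====
theorem to_digit_spec : Claim_equal_to_digit := by
  intro s _
  unfold Spec_to_digit to_digit to_digit_alt
  by_cases h : s = ""
  · simp [h]
  · simp [h, pvLoopA_flag0]
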